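-- pv_equiv track=rewrite | github.com/Affcryptohunt/migration-bot | migration-bot/product_detector.py | is_product_page
-- ===== SOURCE A (Python) =====
-- def is_product_page(url):
--     """
--     Very simple heuristic to detect product pages from URL patterns
--     """
--
--     url = url.lower()
--
--     product_keywords = [
--         "/product",
--         "/item",
--         "/book",
--         "/p/",
--         "/dp/",
--         "/catalogue/"
--     ]
--
--     for keyword in product_keywords:
--         if keyword in url:
--             return True
--
--     return False
-- ===== SOURCE B (Python) =====
-- import re
--
-- _PRODUCT_RE = re.compile(r"/product|/item|/book|/p/|/dp/|/catalogue/")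
--
-- def is_product_page(url):
--     """
--     Very simple heuristic to detect product pages from URL patterns
--     """
--     return bool(_PRODUCT_RE.search(url.lower()))
-- ===== Notes on version B (the rewrite author's own statement) =====
-- stated objective: idiomatic
-- what changed: Replaces the per-keyword loop of six substring scans with one precompiled regex alternation searched in a single pass over the lowercased URL.
import Mathlib
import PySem

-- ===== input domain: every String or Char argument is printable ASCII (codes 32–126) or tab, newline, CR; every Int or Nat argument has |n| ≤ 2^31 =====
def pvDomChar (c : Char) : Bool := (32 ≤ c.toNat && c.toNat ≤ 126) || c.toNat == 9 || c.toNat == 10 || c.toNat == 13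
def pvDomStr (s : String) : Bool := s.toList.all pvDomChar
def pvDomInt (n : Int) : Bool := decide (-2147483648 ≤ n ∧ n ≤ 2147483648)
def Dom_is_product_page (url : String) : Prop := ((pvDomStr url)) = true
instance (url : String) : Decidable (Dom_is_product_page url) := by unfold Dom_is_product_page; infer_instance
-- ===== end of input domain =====

-- B replaces A's per-keyword loop of substring scans by a single left-to-right scan
-- (a regex alternation in Python) that tests all six keywords at each position.

-- ===== PORT A =====
-- A's keyword list, in source order
def pvKeywordsA : List String :=
  ["/product", "/item", "/book", "/p/", "/dp/", "/catalogue/"]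

-- A's for-loop with early return: try each keyword in order
def pvLoopA : List String → String → Bool
  | [], _ => false
  | k :: ks, u => if PySem.Str.isIn k u then true else pvLoopA ks u

def is_product_page (url : String) : Bool :=
  pvLoopA pvKeywordsA (PySem.Str.lower url)

-- ===== PORT B =====
-- the same six keywords, as the regex alternation's branches (char lists)
def pvKeywordsB : List (List Char) :=
  ["/product".toList, "/item".toList, "/book".toList, "/p/".toList, "/dp/".toList,
   "/catalogue/".toList]

-- does some alternation branch match at the current position?
def pvMatchHere (s : List Char) : Bool :=
  pvKeywordsB.any (fun k => k.isPrefixOf s)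

-- re.search: one pass, trying the alternation at each position
def pvScan : List Char → Bool
  | [] => false
  | c :: rest => pvMatchHere (c :: rest) || pvScan rest

def is_product_page_alt (url : String) : Bool :=
  pvScan (PySem.Str.lower url).toList

-- ===== PRECONDITION & SPEC =====
def Spec_is_product_page (url : String) (out : Bool) : Prop := out = is_product_page_alt url
instance (url : String) (out : Bool) : Decidable (Spec_is_product_page url out) := by unfold Spec_is_product_page; infer_instance

-- ===== CLAIM (what is proved, stated in full; the proofs are below) =====
def Claim_equal_is_product_page : Prop := ∀ (url : String), Dom_is_product_page url → Spec_is_product_page url (is_product_page url)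

-- ===== LEMMAS AND PROOFS =====

-- A's loop decides "some keyword occurs as a substring"
theorem pvLoopA_eq_any (ks : List String) (u : String) :
    pvLoopA ks u = ks.any (fun k => PySem.Str.isIn k u) := by
  induction ks with
  | nil => rfl
  | cons k ks ih => unfold pvLoopA; rw [List.any_cons, ih]; cases PySem.Str.isIn k u <;> simp

-- B's scan decides "some branch matches at some position", i.e. occurs as an infix
theorem pvScan_iff (s : List Char) :
    pvScan s = true ↔ ∃ k ∈ pvKeywordsB, k <:+: s := by
  induction s with
  | nil =>
    simp only [pvScan]
    constructor
    · intro h; exact absurd h (by decide)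
    · rintro ⟨k, hk, hinf⟩
      have : k = [] := List.eq_nil_of_infix_nil hinf
      revert hk; subst this; decide
  | cons c rest ih =>
    simp only [pvScan, Bool.or_eq_true, ih, pvMatchHere, List.any_eq_true]
    constructor
    · rintro (⟨k, hk, hpre⟩ | ⟨k, hk, hinf⟩)
      · exact ⟨k, hk, (List.isPrefixOf_iff_prefix.mp hpre).isInfix⟩
      · exact ⟨k, hk, hinf.trans (List.suffix_cons c rest).isInfix⟩
    · rintro ⟨k, hk, hinf⟩
      rcases List.infix_cons_iff.mp hinf with hpre | hinf'
      · exact Or.inl ⟨k, hk, List.isPrefixOf_iff_prefix.mpr hpre⟩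
      · exact Or.inr ⟨k, hk, hinf'⟩

-- ===== VERDICT (by name: the statement is the Claim_ definition above) =====
theorem is_product_page_spec : Claim_equal_is_product_page := by
  intro url _
  unfold Spec_is_product_page is_product_page is_product_page_alt
  rw [pvLoopA_eq_any]
  apply Bool.eq_iff_iff.mpr
  rw [pvScan_iff, List.any_eq_true]
  constructor
  · rintro ⟨k, hk, hin⟩
    refine ⟨k.toList, ?_, (PySem.Str.isIn_iff_infix _ _).mp hin⟩
    fin_cases hk <;> simp [pvKeywordsB]
  · rintro ⟨k, hk, hinf⟩
    fin_cases hk <;>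
      exact ⟨_, by simp [pvKeywordsA], (PySem.Str.isIn_iff_infix _ _).mpr hinf⟩
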